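-- pv_equiv track=rewrite | github.com/BAPCon/OaiToJSON-Chrome-Extension | parse_message_html.py | apply_markdown_substitutions
-- ===== SOURCE A (Python) =====
-- def apply_markdown_substitutions(content: str) -> str:
--     """
--     Replaces specific HTML tags with Markdown equivalents.
--
--     Args:
--     - content (str): The HTML content to transform.
--
--     Returns:
--     - str: The content with applied Markdown substitutions.
--     """
--     replacements = {
--         "<strong>": "**",
--         "</strong>": "**",
--         "<em>": "*",
--         "</em>": "*",
--         "<li>": "- ",
--         "</li>": "\n"
--     }
--
--     for html_tag, markdown in replacements.items():
--         content = content.replace(html_tag, markdown)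
--
--     return content
-- ===== SOURCE B (Python) =====
-- def apply_markdown_substitutions(content: str) -> str:
--     """Single left-to-right scan replacing HTML tags with Markdown (one pass instead of six str.replace sweeps)."""
--     replacements = {
--         "<strong>": "**",
--         "</strong>": "**",
--         "<em>": "*",
--         "</em>": "*",
--         "<li>": "- ",
--         "</li>": "\n"
--     }
--     out = []
--     i = 0
--     n = len(content)
--     while i < n:
--         if content[i] == '<':
--             for tag, md in replacements.items():
--                 if content.startswith(tag, i):
--                     out.append(md)
--                     i += len(tag)
--                     break
--             else:
--                 out.append(content[i])
--                 i += 1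
--         else:
--             out.append(content[i])
--             i += 1
--     return ''.join(out)
-- ===== Notes on version B (the rewrite author's own statement) =====
-- stated objective: alternative
-- what changed: Replaces A's six sequential full-string str.replace passes by a single left-to-right scan that matches one of the six tags at each position and emits its markdown replacement directly.
import Mathlib
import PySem

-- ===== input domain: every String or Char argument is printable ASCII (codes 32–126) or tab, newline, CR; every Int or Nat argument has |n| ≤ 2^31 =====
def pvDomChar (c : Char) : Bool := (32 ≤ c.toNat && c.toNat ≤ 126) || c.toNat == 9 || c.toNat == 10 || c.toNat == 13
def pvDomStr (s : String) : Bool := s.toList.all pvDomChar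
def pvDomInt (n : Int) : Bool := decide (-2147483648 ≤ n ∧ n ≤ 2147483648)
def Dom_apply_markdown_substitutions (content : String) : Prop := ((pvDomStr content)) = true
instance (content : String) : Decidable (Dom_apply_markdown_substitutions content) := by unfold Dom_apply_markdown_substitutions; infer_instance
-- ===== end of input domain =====

set_option maxRecDepth 4096

-- B replaces A's six sequential full-string str.replace passes by ONE left-to-right scan that
-- substitutes each tag as it is met (objective: alternative single-pass algorithm, same result).

-- ===== PORT A =====
-- the dict, in insertion order
def replacementsA : List (String × String) :=
  [("<strong>", "**"), ("</strong>", "**"), ("<em>", "*"), ("</em>", "*"), ("<li>", "- "), ("</li>", "\n")]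

def apply_markdown_substitutions (content : String) : String :=
  replacementsA.foldl (fun c p => PySem.Str.replace c p.1 p.2) content

-- ===== PORT B =====
-- B-side helpers: the tags and their markdown replacements as char lists
def tSO : List Char := ['<', 's', 't', 'r', 'o', 'n', 'g', '>']
def tSC : List Char := ['<', '/', 's', 't', 'r', 'o', 'n', 'g', '>']
def tEO : List Char := ['<', 'e', 'm', '>']
def tEC : List Char := ['<', '/', 'e', 'm', '>']
def tLO : List Char := ['<', 'l', 'i', '>']
def tLC : List Char := ['<', '/', 'l', 'i', '>']
def mB : List Char := ['*', '*']
def mE : List Char := ['*']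
def mL : List Char := ['-', ' ']
def mN : List Char := ['\n']

-- the single scan of Source B: at '<' try each tag once (dict order), else copy the char
def scanTags : List Char → List Char
  | [] => []
  | c :: t =>
    if c = '<' then
      if List.isPrefixOf tSO (c :: t) then mB ++ scanTags (t.drop 7)
      else if List.isPrefixOf tSC (c :: t) then mB ++ scanTags (t.drop 8)
      else if List.isPrefixOf tEO (c :: t) then mE ++ scanTags (t.drop 3)
      else if List.isPrefixOf tEC (c :: t) then mE ++ scanTags (t.drop 4)
      else if List.isPrefixOf tLO (c :: t) then mL ++ scanTags (t.drop 3)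
      else if List.isPrefixOf tLC (c :: t) then mN ++ scanTags (t.drop 4)
      else c :: scanTags t
    else c :: scanTags t
termination_by l => l.length
decreasing_by all_goals (simp; try omega)

def apply_markdown_substitutions_alt (content : String) : String :=
  String.ofList (scanTags content.toList)

-- ===== PRECONDITION & SPEC =====
def Spec_apply_markdown_substitutions (content : String) (out : String) : Prop := out = apply_markdown_substitutions_alt content
instance (content : String) (out : String) : Decidable (Spec_apply_markdown_substitutions content out) := by unfold Spec_apply_markdown_substitutions; infer_instance

-- ===== CLAIM (what is proved, stated in full; the proofs are below) =====
def Claim_equal_apply_markdown_substitutions : Prop := ∀ (content : String), Dom_apply_markdown_substitutions content → Spec_apply_markdown_substitutions content (apply_markdown_substitutions content)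

-- ===== LEMMAS AND PROOFS =====

-- fuel-free characterisation of one str.replace pass (old ≠ [])
def repC (old new : List Char) : List Char → List Char
  | [] => []
  | c :: t =>
    if List.isPrefixOf old (c :: t) then new ++ repC old new (t.drop (old.length - 1))
    else c :: repC old new t
termination_by l => l.length
decreasing_by all_goals (simp; try omega)

theorem repC_nil (old new : List Char) : repC old new [] = [] := by simp [repC]

theorem repC_pos (old new : List Char) (c : Char) (t : List Char)
    (h : List.isPrefixOf old (c :: t)) :
    repC old new (c :: t) = new ++ repC old new (t.drop (old.length - 1)) := by
  rw [repC]; simp [h]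

theorem repC_neg (old new : List Char) (c : Char) (t : List Char)
    (h : ¬ List.isPrefixOf old (c :: t)) :
    repC old new (c :: t) = c :: repC old new t := by
  rw [repC]; simp [h]

theorem go_eq_repC (old new : List Char) (hold : old ≠ []) :
    ∀ (fuel : Nat) (l acc : List Char), l.length ≤ fuel →
      PySem.Chars.replace.go old new fuel l acc = acc.reverse ++ repC old new l := by
  intro fuel
  induction fuel with
  | zero =>
    intro l acc h
    have hl : l = [] := List.eq_nil_of_length_eq_zero (Nat.le_zero.mp h)
    subst hl
    simp [PySem.Chars.replace.go, repC_nil]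
  | succ n ih =>
    intro l acc h
    cases l with
    | nil => simp [PySem.Chars.replace.go, repC_nil]
    | cons c t =>
      rw [PySem.Chars.replace.go]
      by_cases hp : List.isPrefixOf old (c :: t)
      · obtain ⟨o, orr, rfl⟩ : ∃ o orr, old = o :: orr := by
          cases old with
          | nil => exact absurd rfl hold
          | cons o orr => exact ⟨o, orr, rfl⟩
        simp only [hp, if_pos]
        rw [ih (List.drop (o :: orr).length (c :: t)) (new.reverse ++ acc)
              (by simp at h ⊢; omega)]
        rw [repC_pos _ _ _ _ hp]
        simp [List.reverse_append]
      · simp only [hp, if_neg, Bool.false_eq_true, not_false_eq_true]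
        rw [ih t (c :: acc) (by simpa using Nat.le_of_succ_le_succ h)]
        rw [repC_neg _ _ _ _ hp]
        simp

theorem replace_eq_repC (s old new : List Char) (hold : old ≠ []) :
    PySem.Chars.replace s old new = repC old new s := by
  have he : old.isEmpty = false := by cases old with
    | nil => exact absurd rfl hold
    | cons o orr => rfl
  rw [PySem.Chars.replace, he]
  simpa using go_eq_repC old new hold s.length s [] (le_refl _)

-- A's six passes as a function on char lists
def chainA (cs : List Char) : List Char :=
  repC tLC mN (repC tLO mL (repC tEC mE (repC tEO mE (repC tSC mB (repC tSO mB cs)))))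

theorem A_chain (content : String) :
    (apply_markdown_substitutions content).toList = chainA content.toList := by
  unfold apply_markdown_substitutions replacementsA chainA
  simp only [List.foldl]
  rw [PySem.Str.toList_replace, PySem.Str.toList_replace, PySem.Str.toList_replace,
      PySem.Str.toList_replace, PySem.Str.toList_replace, PySem.Str.toList_replace]
  rw [replace_eq_repC _ _ _ (by decide), replace_eq_repC _ _ _ (by decide),
      replace_eq_repC _ _ _ (by decide), replace_eq_repC _ _ _ (by decide),
      replace_eq_repC _ _ _ (by decide), replace_eq_repC _ _ _ (by decide)]
  rfl

-- a match of the pattern at the front consumes the pattern and emits the replacement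
theorem repC_append_self (old new : List Char) (o : Char) (orr s : List Char)
    (h : old = o :: orr) :
    repC old new (old ++ s) = new ++ repC old new s := by
  subst h
  rw [List.cons_append, repC_pos _ _ _ _ (by
    rw [List.isPrefixOf_iff_prefix, ← List.cons_append]; exact List.prefix_append _ _)]
  simp

-- a non-'<' char passes through a pass whose pattern starts with '<'
theorem repC_cons_ne (old new : List Char) (orr : List Char) (c : Char) (t : List Char)
    (hold : old = '<' :: orr) (hc : c ≠ '<') :
    repC old new (c :: t) = c :: repC old new t := by
  apply repC_neg
  subst hold
  simp [List.isPrefixOf]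
  intro h
  exact absurd h.symm hc

-- a block with no '<' passes through unchanged
theorem repC_clean_append (old new : List Char) (orr p s : List Char)
    (hold : old = '<' :: orr) (hp : ∀ x ∈ p, x ≠ '<') :
    repC old new (p ++ s) = p ++ repC old new s := by
  induction p with
  | nil => simp
  | cons a q ih =>
    rw [List.cons_append, repC_cons_ne old new orr a _ hold (hp a List.mem_cons_self)]
    rw [ih (fun x hx => hp x (List.mem_cons_of_mem _ hx))]
    rfl

-- two tags that already differ in their first three chars: neither matches at the other's front
theorem no_cross_prefix (a b s : List Char) (ha : 3 ≤ a.length) (hb : 3 ≤ b.length)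
    (hne : b.take 3 ≠ a.take 3) : ¬ List.isPrefixOf b (a ++ s) := by
  rw [List.isPrefixOf_iff_prefix]
  rintro ⟨r, hr⟩
  apply hne
  have h3 := congrArg (List.take 3) hr
  rwa [List.take_append_of_le_length hb, List.take_append_of_le_length ha] at h3

-- a pattern with no '<' and no replacement char is a prefix of the output iff of the input
theorem prefix_repC (old new : List Char) (orr : List Char) (d : Char) (nr : List Char)
    (hold : old = '<' :: orr) (hnew : new = d :: nr) :
    ∀ (n : Nat) (s p : List Char), s.length ≤ n → (∀ x ∈ p, x ≠ '<' ∧ x ∉ new) →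
      List.isPrefixOf p (repC old new s) = List.isPrefixOf p s := by
  intro n
  induction n with
  | zero =>
    intro s p h hp
    have hs : s = [] := List.eq_nil_of_length_eq_zero (Nat.le_zero.mp h)
    subst hs; rw [repC_nil]
  | succ n ih =>
    intro s p h hp
    cases s with
    | nil => rw [repC_nil]
    | cons c t =>
      by_cases hpre : List.isPrefixOf old (c :: t)
      · have hc : c = '<' := by
          subst hold
          rw [List.isPrefixOf_iff_prefix] at hpre
          obtain ⟨r, hr⟩ := hpre
          rw [List.cons_append] at hr
          injection hr with hh _
          exact hh.symm
        rw [repC_pos _ _ _ _ hpre, hnew]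
        cases p with
        | nil => simp
        | cons a q =>
          have ha := hp a List.mem_cons_self
          have had : (a == d) = false := by
            simp only [beq_eq_false_iff_ne, ne_eq]
            intro hh; exact ha.2 (hh ▸ (hnew ▸ List.mem_cons_self))
          have hac : (a == c) = false := by
            simp only [beq_eq_false_iff_ne, ne_eq]
            intro hh; exact ha.1 (hh.trans hc)
          simp [List.isPrefixOf, had, hac]
      · rw [repC_neg _ _ _ _ hpre]
        cases p with
        | nil => rfl
        | cons a q =>
          simp only [List.isPrefixOf]
          rw [ih t q (by simpa using Nat.le_of_succ_le_succ h)
                (fun x hx => hp x (List.mem_cons_of_mem _ hx))]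

-- a whole different tag passes through a pass unchanged
theorem repC_peel_tag (old new a : List Char) (orr : List Char) (c0 : Char) (ar s : List Char)
    (hold : old = '<' :: orr) (ha : a = c0 :: ar)
    (h3a : 3 ≤ a.length) (h3o : 3 ≤ old.length)
    (hne : old.take 3 ≠ a.take 3)
    (har : ∀ x ∈ ar, x ≠ '<') :
    repC old new (a ++ s) = a ++ repC old new s := by
  have hnp := no_cross_prefix a old s h3a h3o hne
  subst ha
  rw [List.cons_append] at hnp ⊢
  rw [repC_neg _ _ _ _ hnp, repC_clean_append old new orr ar s hold har]
  rfl

-- the six tag-consumption equations for the chain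
theorem chain_tSO (rest : List Char) : chainA (tSO ++ rest) = mB ++ chainA rest := by
  unfold chainA
  rw [repC_append_self tSO mB '<' ['s', 't', 'r', 'o', 'n', 'g', '>'] _ rfl,
      repC_clean_append tSC mB ['/', 's', 't', 'r', 'o', 'n', 'g', '>'] mB _ rfl (by simp [mB]),
      repC_clean_append tEO mE ['e', 'm', '>'] mB _ rfl (by simp [mB]),
      repC_clean_append tEC mE ['/', 'e', 'm', '>'] mB _ rfl (by simp [mB]),
      repC_clean_append tLO mL ['l', 'i', '>'] mB _ rfl (by simp [mB]),
      repC_clean_append tLC mN ['/', 'l', 'i', '>'] mB _ rfl (by simp [mB])]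

theorem chain_tSC (rest : List Char) : chainA (tSC ++ rest) = mB ++ chainA rest := by
  unfold chainA
  rw [repC_peel_tag tSO mB tSC ['s', 't', 'r', 'o', 'n', 'g', '>'] '<' ['/', 's', 't', 'r', 'o', 'n', 'g', '>'] _ rfl rfl (by decide) (by decide) (by decide) (by simp),
      repC_append_self tSC mB '<' ['/', 's', 't', 'r', 'o', 'n', 'g', '>'] _ rfl,
      repC_clean_append tEO mE ['e', 'm', '>'] mB _ rfl (by simp [mB]),
      repC_clean_append tEC mE ['/', 'e', 'm', '>'] mB _ rfl (by simp [mB]),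
      repC_clean_append tLO mL ['l', 'i', '>'] mB _ rfl (by simp [mB]),
      repC_clean_append tLC mN ['/', 'l', 'i', '>'] mB _ rfl (by simp [mB])]

theorem chain_tEO (rest : List Char) : chainA (tEO ++ rest) = mE ++ chainA rest := by
  unfold chainA
  rw [repC_peel_tag tSO mB tEO ['s', 't', 'r', 'o', 'n', 'g', '>'] '<' ['e', 'm', '>'] _ rfl rfl (by decide) (by decide) (by decide) (by simp),
      repC_peel_tag tSC mB tEO ['/', 's', 't', 'r', 'o', 'n', 'g', '>'] '<' ['e', 'm', '>'] _ rfl rfl (by decide) (by decide) (by decide) (by simp),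
      repC_append_self tEO mE '<' ['e', 'm', '>'] _ rfl,
      repC_clean_append tEC mE ['/', 'e', 'm', '>'] mE _ rfl (by simp [mE]),
      repC_clean_append tLO mL ['l', 'i', '>'] mE _ rfl (by simp [mE]),
      repC_clean_append tLC mN ['/', 'l', 'i', '>'] mE _ rfl (by simp [mE])]

theorem chain_tEC (rest : List Char) : chainA (tEC ++ rest) = mE ++ chainA rest := by
  unfold chainA
  rw [repC_peel_tag tSO mB tEC ['s', 't', 'r', 'o', 'n', 'g', '>'] '<' ['/', 'e', 'm', '>'] _ rfl rfl (by decide) (by decide) (by decide) (by simp),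
      repC_peel_tag tSC mB tEC ['/', 's', 't', 'r', 'o', 'n', 'g', '>'] '<' ['/', 'e', 'm', '>'] _ rfl rfl (by decide) (by decide) (by decide) (by simp),
      repC_peel_tag tEO mE tEC ['e', 'm', '>'] '<' ['/', 'e', 'm', '>'] _ rfl rfl (by decide) (by decide) (by decide) (by simp),
      repC_append_self tEC mE '<' ['/', 'e', 'm', '>'] _ rfl,
      repC_clean_append tLO mL ['l', 'i', '>'] mE _ rfl (by simp [mE]),
      repC_clean_append tLC mN ['/', 'l', 'i', '>'] mE _ rfl (by simp [mE])]

theorem chain_tLO (rest : List Char) : chainA (tLO ++ rest) = mL ++ chainA rest := by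
  unfold chainA
  rw [repC_peel_tag tSO mB tLO ['s', 't', 'r', 'o', 'n', 'g', '>'] '<' ['l', 'i', '>'] _ rfl rfl (by decide) (by decide) (by decide) (by simp),
      repC_peel_tag tSC mB tLO ['/', 's', 't', 'r', 'o', 'n', 'g', '>'] '<' ['l', 'i', '>'] _ rfl rfl (by decide) (by decide) (by decide) (by simp),
      repC_peel_tag tEO mE tLO ['e', 'm', '>'] '<' ['l', 'i', '>'] _ rfl rfl (by decide) (by decide) (by decide) (by simp),
      repC_peel_tag tEC mE tLO ['/', 'e', 'm', '>'] '<' ['l', 'i', '>'] _ rfl rfl (by decide) (by decide) (by decide) (by simp),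
      repC_append_self tLO mL '<' ['l', 'i', '>'] _ rfl,
      repC_clean_append tLC mN ['/', 'l', 'i', '>'] mL _ rfl (by simp [mL])]

theorem chain_tLC (rest : List Char) : chainA (tLC ++ rest) = mN ++ chainA rest := by
  unfold chainA
  rw [repC_peel_tag tSO mB tLC ['s', 't', 'r', 'o', 'n', 'g', '>'] '<' ['/', 'l', 'i', '>'] _ rfl rfl (by decide) (by decide) (by decide) (by simp),
      repC_peel_tag tSC mB tLC ['/', 's', 't', 'r', 'o', 'n', 'g', '>'] '<' ['/', 'l', 'i', '>'] _ rfl rfl (by decide) (by decide) (by decide) (by simp),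
      repC_peel_tag tEO mE tLC ['e', 'm', '>'] '<' ['/', 'l', 'i', '>'] _ rfl rfl (by decide) (by decide) (by decide) (by simp),
      repC_peel_tag tEC mE tLC ['/', 'e', 'm', '>'] '<' ['/', 'l', 'i', '>'] _ rfl rfl (by decide) (by decide) (by decide) (by simp),
      repC_peel_tag tLO mL tLC ['l', 'i', '>'] '<' ['/', 'l', 'i', '>'] _ rfl rfl (by decide) (by decide) (by decide) (by simp),
      repC_append_self tLC mN '<' ['/', 'l', 'i', '>'] _ rfl]

-- no tag at the front: the head char passes through all six passes
theorem chain_cons (c : Char) (t : List Char)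
    (h1 : ¬ List.isPrefixOf tSO (c :: t)) (h2 : ¬ List.isPrefixOf tSC (c :: t))
    (h3 : ¬ List.isPrefixOf tEO (c :: t)) (h4 : ¬ List.isPrefixOf tEC (c :: t))
    (h5 : ¬ List.isPrefixOf tLO (c :: t)) (h6 : ¬ List.isPrefixOf tLC (c :: t)) :
    chainA (c :: t) = c :: chainA t := by
  by_cases hc : c = '<'
  · subst hc
    unfold chainA
    rw [repC_neg _ _ _ _ h1]
    have e2 : List.isPrefixOf ['/', 's', 't', 'r', 'o', 'n', 'g', '>'] (repC tSO mB t)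
        = List.isPrefixOf ['/', 's', 't', 'r', 'o', 'n', 'g', '>'] t :=
      prefix_repC tSO mB ['s', 't', 'r', 'o', 'n', 'g', '>'] '*' ['*'] rfl rfl
        t.length t _ (le_refl _) (by intro x hx; fin_cases hx <;> simp [mB])
    have h2' : ¬ List.isPrefixOf tSC ('<' :: repC tSO mB t) := by
      simp only [tSC, List.isPrefixOf, beq_self_eq_true, Bool.true_and] at h2 ⊢
      rw [e2]; exact h2
    rw [repC_neg _ _ _ _ h2']
    have e3 : List.isPrefixOf ['e', 'm', '>'] (repC tSC mB (repC tSO mB t))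
        = List.isPrefixOf ['e', 'm', '>'] t := by
      rw [prefix_repC tSC mB ['/', 's', 't', 'r', 'o', 'n', 'g', '>'] '*' ['*'] rfl rfl
            _ _ _ (le_refl _) (by intro x hx; fin_cases hx <;> simp [mB]),
          prefix_repC tSO mB ['s', 't', 'r', 'o', 'n', 'g', '>'] '*' ['*'] rfl rfl
            _ _ _ (le_refl _) (by intro x hx; fin_cases hx <;> simp [mB])]
    have h3' : ¬ List.isPrefixOf tEO ('<' :: repC tSC mB (repC tSO mB t)) := by
      simp only [tEO, List.isPrefixOf, beq_self_eq_true, Bool.true_and] at h3 ⊢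
      rw [e3]; exact h3
    rw [repC_neg _ _ _ _ h3']
    have e4 : List.isPrefixOf ['/', 'e', 'm', '>'] (repC tEO mE (repC tSC mB (repC tSO mB t)))
        = List.isPrefixOf ['/', 'e', 'm', '>'] t := by
      rw [prefix_repC tEO mE ['e', 'm', '>'] '*' [] rfl rfl _ _ _ (le_refl _) (by intro x hx; fin_cases hx <;> simp [mE]),
          prefix_repC tSC mB ['/', 's', 't', 'r', 'o', 'n', 'g', '>'] '*' ['*'] rfl rfl
            _ _ _ (le_refl _) (by intro x hx; fin_cases hx <;> simp [mB]),
          prefix_repC tSO mB ['s', 't', 'r', 'o', 'n', 'g', '>'] '*' ['*'] rfl rfl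
            _ _ _ (le_refl _) (by intro x hx; fin_cases hx <;> simp [mB])]
    have h4' : ¬ List.isPrefixOf tEC ('<' :: repC tEO mE (repC tSC mB (repC tSO mB t))) := by
      simp only [tEC, List.isPrefixOf, beq_self_eq_true, Bool.true_and] at h4 ⊢
      rw [e4]; exact h4
    rw [repC_neg _ _ _ _ h4']
    have e5 : List.isPrefixOf ['l', 'i', '>']
          (repC tEC mE (repC tEO mE (repC tSC mB (repC tSO mB t))))
        = List.isPrefixOf ['l', 'i', '>'] t := by
      rw [prefix_repC tEC mE ['/', 'e', 'm', '>'] '*' [] rfl rfl _ _ _ (le_refl _) (by intro x hx; fin_cases hx <;> simp [mE]),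
          prefix_repC tEO mE ['e', 'm', '>'] '*' [] rfl rfl _ _ _ (le_refl _) (by intro x hx; fin_cases hx <;> simp [mE]),
          prefix_repC tSC mB ['/', 's', 't', 'r', 'o', 'n', 'g', '>'] '*' ['*'] rfl rfl
            _ _ _ (le_refl _) (by intro x hx; fin_cases hx <;> simp [mB]),
          prefix_repC tSO mB ['s', 't', 'r', 'o', 'n', 'g', '>'] '*' ['*'] rfl rfl
            _ _ _ (le_refl _) (by intro x hx; fin_cases hx <;> simp [mB])]
    have h5' : ¬ List.isPrefixOf tLO
        ('<' :: repC tEC mE (repC tEO mE (repC tSC mB (repC tSO mB t)))) := by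
      simp only [tLO, List.isPrefixOf, beq_self_eq_true, Bool.true_and] at h5 ⊢
      rw [e5]; exact h5
    rw [repC_neg _ _ _ _ h5']
    have e6 : List.isPrefixOf ['/', 'l', 'i', '>']
          (repC tLO mL (repC tEC mE (repC tEO mE (repC tSC mB (repC tSO mB t)))))
        = List.isPrefixOf ['/', 'l', 'i', '>'] t := by
      rw [prefix_repC tLO mL ['l', 'i', '>'] '-' [' '] rfl rfl _ _ _ (le_refl _) (by intro x hx; fin_cases hx <;> simp [mL]),
          prefix_repC tEC mE ['/', 'e', 'm', '>'] '*' [] rfl rfl _ _ _ (le_refl _) (by intro x hx; fin_cases hx <;> simp [mE]),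
          prefix_repC tEO mE ['e', 'm', '>'] '*' [] rfl rfl _ _ _ (le_refl _) (by intro x hx; fin_cases hx <;> simp [mE]),
          prefix_repC tSC mB ['/', 's', 't', 'r', 'o', 'n', 'g', '>'] '*' ['*'] rfl rfl
            _ _ _ (le_refl _) (by intro x hx; fin_cases hx <;> simp [mB]),
          prefix_repC tSO mB ['s', 't', 'r', 'o', 'n', 'g', '>'] '*' ['*'] rfl rfl
            _ _ _ (le_refl _) (by intro x hx; fin_cases hx <;> simp [mB])]
    have h6' : ¬ List.isPrefixOf tLC
        ('<' :: repC tLO mL (repC tEC mE (repC tEO mE (repC tSC mB (repC tSO mB t))))) := by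
      simp only [tLC, List.isPrefixOf, beq_self_eq_true, Bool.true_and] at h6 ⊢
      rw [e6]; exact h6
    rw [repC_neg _ _ _ _ h6']
  · unfold chainA
    rw [repC_cons_ne tSO mB ['s', 't', 'r', 'o', 'n', 'g', '>'] c t rfl hc,
        repC_cons_ne tSC mB ['/', 's', 't', 'r', 'o', 'n', 'g', '>'] c _ rfl hc,
        repC_cons_ne tEO mE ['e', 'm', '>'] c _ rfl hc,
        repC_cons_ne tEC mE ['/', 'e', 'm', '>'] c _ rfl hc,
        repC_cons_ne tLO mL ['l', 'i', '>'] c _ rfl hc,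
        repC_cons_ne tLC mN ['/', 'l', 'i', '>'] c _ rfl hc]

-- the six tag-consumption equations for the scan
theorem scan_tSO (rest : List Char) : scanTags (tSO ++ rest) = mB ++ scanTags rest := by
  rw [show tSO ++ rest = '<' :: (['s', 't', 'r', 'o', 'n', 'g', '>'] ++ rest) from rfl, scanTags]
  have hp : tSO.isPrefixOf ('<' :: (['s', 't', 'r', 'o', 'n', 'g', '>'] ++ rest)) = true := by
    rw [List.isPrefixOf_iff_prefix]; exact List.prefix_append tSO rest
  rw [if_pos rfl,
      if_pos hp]
  rw [show (7 : Nat) = (['s', 't', 'r', 'o', 'n', 'g', '>'] : List Char).length from rfl, List.drop_left]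

theorem scan_tSC (rest : List Char) : scanTags (tSC ++ rest) = mB ++ scanTags rest := by
  rw [show tSC ++ rest = '<' :: (['/', 's', 't', 'r', 'o', 'n', 'g', '>'] ++ rest) from rfl, scanTags]
  have hn0 : ¬ tSO.isPrefixOf ('<' :: (['/', 's', 't', 'r', 'o', 'n', 'g', '>'] ++ rest)) = true :=
    no_cross_prefix tSC tSO rest (by decide) (by decide) (by decide)
  have hp : tSC.isPrefixOf ('<' :: (['/', 's', 't', 'r', 'o', 'n', 'g', '>'] ++ rest)) = true := by
    rw [List.isPrefixOf_iff_prefix]; exact List.prefix_append tSC rest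
  rw [if_pos rfl,
      if_neg hn0,
      if_pos hp]
  rw [show (8 : Nat) = (['/', 's', 't', 'r', 'o', 'n', 'g', '>'] : List Char).length from rfl, List.drop_left]

theorem scan_tEO (rest : List Char) : scanTags (tEO ++ rest) = mE ++ scanTags rest := by
  rw [show tEO ++ rest = '<' :: (['e', 'm', '>'] ++ rest) from rfl, scanTags]
  have hn0 : ¬ tSO.isPrefixOf ('<' :: (['e', 'm', '>'] ++ rest)) = true :=
    no_cross_prefix tEO tSO rest (by decide) (by decide) (by decide)
  have hn1 : ¬ tSC.isPrefixOf ('<' :: (['e', 'm', '>'] ++ rest)) = true :=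
    no_cross_prefix tEO tSC rest (by decide) (by decide) (by decide)
  have hp : tEO.isPrefixOf ('<' :: (['e', 'm', '>'] ++ rest)) = true := by
    rw [List.isPrefixOf_iff_prefix]; exact List.prefix_append tEO rest
  rw [if_pos rfl,
      if_neg hn0,
      if_neg hn1,
      if_pos hp]
  rw [show (3 : Nat) = (['e', 'm', '>'] : List Char).length from rfl, List.drop_left]

theorem scan_tEC (rest : List Char) : scanTags (tEC ++ rest) = mE ++ scanTags rest := by
  rw [show tEC ++ rest = '<' :: (['/', 'e', 'm', '>'] ++ rest) from rfl, scanTags]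
  have hn0 : ¬ tSO.isPrefixOf ('<' :: (['/', 'e', 'm', '>'] ++ rest)) = true :=
    no_cross_prefix tEC tSO rest (by decide) (by decide) (by decide)
  have hn1 : ¬ tSC.isPrefixOf ('<' :: (['/', 'e', 'm', '>'] ++ rest)) = true :=
    no_cross_prefix tEC tSC rest (by decide) (by decide) (by decide)
  have hn2 : ¬ tEO.isPrefixOf ('<' :: (['/', 'e', 'm', '>'] ++ rest)) = true :=
    no_cross_prefix tEC tEO rest (by decide) (by decide) (by decide)
  have hp : tEC.isPrefixOf ('<' :: (['/', 'e', 'm', '>'] ++ rest)) = true := by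
    rw [List.isPrefixOf_iff_prefix]; exact List.prefix_append tEC rest
  rw [if_pos rfl,
      if_neg hn0,
      if_neg hn1,
      if_neg hn2,
      if_pos hp]
  rw [show (4 : Nat) = (['/', 'e', 'm', '>'] : List Char).length from rfl, List.drop_left]

theorem scan_tLO (rest : List Char) : scanTags (tLO ++ rest) = mL ++ scanTags rest := by
  rw [show tLO ++ rest = '<' :: (['l', 'i', '>'] ++ rest) from rfl, scanTags]
  have hn0 : ¬ tSO.isPrefixOf ('<' :: (['l', 'i', '>'] ++ rest)) = true :=
    no_cross_prefix tLO tSO rest (by decide) (by decide) (by decide)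
  have hn1 : ¬ tSC.isPrefixOf ('<' :: (['l', 'i', '>'] ++ rest)) = true :=
    no_cross_prefix tLO tSC rest (by decide) (by decide) (by decide)
  have hn2 : ¬ tEO.isPrefixOf ('<' :: (['l', 'i', '>'] ++ rest)) = true :=
    no_cross_prefix tLO tEO rest (by decide) (by decide) (by decide)
  have hn3 : ¬ tEC.isPrefixOf ('<' :: (['l', 'i', '>'] ++ rest)) = true :=
    no_cross_prefix tLO tEC rest (by decide) (by decide) (by decide)
  have hp : tLO.isPrefixOf ('<' :: (['l', 'i', '>'] ++ rest)) = true := by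
    rw [List.isPrefixOf_iff_prefix]; exact List.prefix_append tLO rest
  rw [if_pos rfl,
      if_neg hn0,
      if_neg hn1,
      if_neg hn2,
      if_neg hn3,
      if_pos hp]
  rw [show (3 : Nat) = (['l', 'i', '>'] : List Char).length from rfl, List.drop_left]

theorem scan_tLC (rest : List Char) : scanTags (tLC ++ rest) = mN ++ scanTags rest := by
  rw [show tLC ++ rest = '<' :: (['/', 'l', 'i', '>'] ++ rest) from rfl, scanTags]
  have hn0 : ¬ tSO.isPrefixOf ('<' :: (['/', 'l', 'i', '>'] ++ rest)) = true :=
    no_cross_prefix tLC tSO rest (by decide) (by decide) (by decide)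
  have hn1 : ¬ tSC.isPrefixOf ('<' :: (['/', 'l', 'i', '>'] ++ rest)) = true :=
    no_cross_prefix tLC tSC rest (by decide) (by decide) (by decide)
  have hn2 : ¬ tEO.isPrefixOf ('<' :: (['/', 'l', 'i', '>'] ++ rest)) = true :=
    no_cross_prefix tLC tEO rest (by decide) (by decide) (by decide)
  have hn3 : ¬ tEC.isPrefixOf ('<' :: (['/', 'l', 'i', '>'] ++ rest)) = true :=
    no_cross_prefix tLC tEC rest (by decide) (by decide) (by decide)
  have hn4 : ¬ tLO.isPrefixOf ('<' :: (['/', 'l', 'i', '>'] ++ rest)) = true :=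
    no_cross_prefix tLC tLO rest (by decide) (by decide) (by decide)
  have hp : tLC.isPrefixOf ('<' :: (['/', 'l', 'i', '>'] ++ rest)) = true := by
    rw [List.isPrefixOf_iff_prefix]; exact List.prefix_append tLC rest
  rw [if_pos rfl,
      if_neg hn0,
      if_neg hn1,
      if_neg hn2,
      if_neg hn3,
      if_neg hn4,
      if_pos hp]
  rw [show (4 : Nat) = (['/', 'l', 'i', '>'] : List Char).length from rfl, List.drop_left]

theorem scan_cons (c : Char) (t : List Char)
    (h1 : ¬ List.isPrefixOf tSO (c :: t)) (h2 : ¬ List.isPrefixOf tSC (c :: t))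
    (h3 : ¬ List.isPrefixOf tEO (c :: t)) (h4 : ¬ List.isPrefixOf tEC (c :: t))
    (h5 : ¬ List.isPrefixOf tLO (c :: t)) (h6 : ¬ List.isPrefixOf tLC (c :: t)) :
    scanTags (c :: t) = c :: scanTags t := by
  by_cases hc : c = '<'
  · subst hc
    rw [scanTags, if_pos rfl, if_neg h1, if_neg h2, if_neg h3, if_neg h4, if_neg h5, if_neg h6]
  · rw [scanTags, if_neg hc]

-- the main equivalence on char lists
theorem chain_eq_scan : ∀ (n : Nat) (cs : List Char), cs.length ≤ n → chainA cs = scanTags cs := by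
  intro n
  induction n with
  | zero =>
    intro cs h
    have hs : cs = [] := List.eq_nil_of_length_eq_zero (Nat.le_zero.mp h)
    subst hs
    simp [chainA, repC_nil, scanTags]
  | succ n ih =>
    intro cs h
    cases cs with
    | nil => simp [chainA, repC_nil, scanTags]
    | cons c t =>
      by_cases h1 : List.isPrefixOf tSO (c :: t)
      · obtain ⟨rest, hr⟩ := List.isPrefixOf_iff_prefix.mp h1
        rw [← hr, chain_tSO, scan_tSO, ih rest (by
          have hl := congrArg List.length hr; simp [tSO] at hl; simp at h; omega)]
      by_cases h2 : List.isPrefixOf tSC (c :: t)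
      · obtain ⟨rest, hr⟩ := List.isPrefixOf_iff_prefix.mp h2
        rw [← hr, chain_tSC, scan_tSC, ih rest (by
          have hl := congrArg List.length hr; simp [tSC] at hl; simp at h; omega)]
      by_cases h3 : List.isPrefixOf tEO (c :: t)
      · obtain ⟨rest, hr⟩ := List.isPrefixOf_iff_prefix.mp h3
        rw [← hr, chain_tEO, scan_tEO, ih rest (by
          have hl := congrArg List.length hr; simp [tEO] at hl; simp at h; omega)]
      by_cases h4 : List.isPrefixOf tEC (c :: t)
      · obtain ⟨rest, hr⟩ := List.isPrefixOf_iff_prefix.mp h4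
        rw [← hr, chain_tEC, scan_tEC, ih rest (by
          have hl := congrArg List.length hr; simp [tEC] at hl; simp at h; omega)]
      by_cases h5 : List.isPrefixOf tLO (c :: t)
      · obtain ⟨rest, hr⟩ := List.isPrefixOf_iff_prefix.mp h5
        rw [← hr, chain_tLO, scan_tLO, ih rest (by
          have hl := congrArg List.length hr; simp [tLO] at hl; simp at h; omega)]
      by_cases h6 : List.isPrefixOf tLC (c :: t)
      · obtain ⟨rest, hr⟩ := List.isPrefixOf_iff_prefix.mp h6
        rw [← hr, chain_tLC, scan_tLC, ih rest (by
          have hl := congrArg List.length hr; simp [tLC] at hl; simp at h; omega)]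
      · rw [chain_cons c t h1 h2 h3 h4 h5 h6, scan_cons c t h1 h2 h3 h4 h5 h6,
            ih t (by simpa using Nat.le_of_succ_le_succ h)]

-- ===== VERDICT (by name: the statement is the Claim_ definition above) =====
theorem apply_markdown_substitutions_spec : Claim_equal_apply_markdown_substitutions := by
  intro content _
  unfold Spec_apply_markdown_substitutions apply_markdown_substitutions_alt
  apply String.toList_inj.mp
  rw [A_chain]
  simpa using chain_eq_scan content.toList.length content.toList (le_refl _)
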